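-- pv_equiv track=rewrite | github.com/praskaa/PyPrasKaa | lib/area_reinforcement.py | group_layers_for_adaptive_ar_creation
-- ===== SOURCE A (Python) =====
-- def separate_top_bottom_layers(ui_settings):
--     """Separate layers menjadi top dan bottom groups dengan support untuk additional layers"""
--     top_layers = []
--     bottom_layers = []
--
--     for layer in ui_settings:
--         layer_id = layer.get("layer_id", "")
--         if layer_id.startswith("Top"):
--             top_layers.append(layer)
--         elif layer_id.startswith("Bottom"):
--             bottom_layers.append(layer)
--
--     # Sort by priority within each group (Major first, then Minor)
--     LAYER_PRIORITY = {
--         "Bottom Major": 1, "Top Major": 1,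
--         "Bottom Minor": 2, "Top Minor": 2,
--         "Bottom Major Additional": 3, "Top Major Additional": 3,
--         "Bottom Minor Additional": 4, "Top Minor Additional": 4
--     }
--
--     top_layers.sort(key=lambda x: LAYER_PRIORITY.get(x.get("layer_id"), 999))
--     bottom_layers.sort(key=lambda x: LAYER_PRIORITY.get(x.get("layer_id"), 999))
--
--     return {"top": top_layers, "bottom": bottom_layers}
--
-- def group_layers_for_adaptive_ar_creation(ui_settings):
--     """
--     Group layers untuk adaptive AR creation dengan support additional layers.
--     Returns structured groups untuk conditional AR creation.
--     """
--     # Separate by side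
--     separated = separate_top_bottom_layers(ui_settings)
--
--     # Group by primary vs additional
--     groups = {
--         'bottom_primary': [l for l in separated['bottom'] if not l.get('layer_id', '').endswith('Additional')],
--         'bottom_additional': [l for l in separated['bottom'] if l.get('layer_id', '').endswith('Additional')],
--         'top_primary': [l for l in separated['top'] if not l.get('layer_id', '').endswith('Additional')],
--         'top_additional': [l for l in separated['top'] if l.get('layer_id', '').endswith('Additional')]
--     }
--
--     # Validate groupings
--     for group_name, layers in groups.items():
--         if len(layers) > 2:
--             raise ValueError("Group {} cannot have more than 2 layers (Revit limitation)".format(group_name))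
--
--     return groups
-- ===== SOURCE B (Python) =====
-- def group_layers_for_adaptive_ar_creation(ui_settings):
--     """Single-pass bucket classification instead of separate+filter passes."""
--     LAYER_PRIORITY = {
--         "Bottom Major": 1, "Top Major": 1,
--         "Bottom Minor": 2, "Top Minor": 2,
--         "Bottom Major Additional": 3, "Top Major Additional": 3,
--         "Bottom Minor Additional": 4, "Top Minor Additional": 4
--     }
--     buckets = {'bottom_primary': [], 'bottom_additional': [],
--                'top_primary': [], 'top_additional': []}
--     for layer in ui_settings:
--         layer_id = layer.get("layer_id", "")
--         if layer_id.startswith("Top"):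
--             side = 'top'
--         elif layer_id.startswith("Bottom"):
--             side = 'bottom'
--         else:
--             continue
--         kind = 'additional' if layer_id.endswith('Additional') else 'primary'
--         buckets[side + '_' + kind].append(layer)
--     for name in buckets:
--         buckets[name] = sorted(buckets[name],
--                                key=lambda x: LAYER_PRIORITY.get(x.get("layer_id"), 999))
--         if len(buckets[name]) > 2:
--             raise ValueError("Group {} cannot have more than 2 layers (Revit limitation)".format(name))
--     return buckets
-- ===== Notes on version B (the rewrite author's own statement) =====
-- stated objective: simpler
-- what changed: Replaced the separate_top_bottom_layers helper plus four filter passes over the two sorted side lists by a single classification pass that appends each layer directly into one of the four buckets, then sorts each bucket once (stable sort commutes with the filtering).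
import Mathlib
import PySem

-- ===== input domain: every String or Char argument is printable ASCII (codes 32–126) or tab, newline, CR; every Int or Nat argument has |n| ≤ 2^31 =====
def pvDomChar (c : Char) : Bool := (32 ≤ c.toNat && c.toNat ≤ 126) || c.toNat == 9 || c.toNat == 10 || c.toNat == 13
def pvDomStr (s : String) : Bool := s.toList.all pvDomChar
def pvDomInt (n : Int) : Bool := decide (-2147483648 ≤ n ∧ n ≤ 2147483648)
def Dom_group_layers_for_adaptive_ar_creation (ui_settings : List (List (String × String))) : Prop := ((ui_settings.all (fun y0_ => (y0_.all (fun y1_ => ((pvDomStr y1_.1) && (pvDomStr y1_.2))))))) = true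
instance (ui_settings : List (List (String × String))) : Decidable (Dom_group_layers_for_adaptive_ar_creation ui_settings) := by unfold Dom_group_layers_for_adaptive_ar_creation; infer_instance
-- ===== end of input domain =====

-- B replaces the helper + four filter passes over sorted side lists by one classification
-- pass into four buckets, each sorted once (objective: simpler).

-- shared helpers: layer.get("layer_id", "") and the LAYER_PRIORITY.get(x.get("layer_id"), 999) sort key
def pvLid (layer : List (String × String)) : String :=
  ((layer.find? (fun kv => kv.1 == "layer_id")).map Prod.snd).getD ""

def pvPrio (layer : List (String × String)) : Int :=
  match (layer.find? (fun kv => kv.1 == "layer_id")).map Prod.snd with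
  | some s => (PySem.Dict.ofList
      [("Bottom Major", (1 : Int)), ("Top Major", 1),
       ("Bottom Minor", 2), ("Top Minor", 2),
       ("Bottom Major Additional", 3), ("Top Major Additional", 3),
       ("Bottom Minor Additional", 4), ("Top Minor Additional", 4)]).getD s 999
  | none => 999

-- ===== PORT A =====
def separate_top_bottom_layers (ui_settings : List (List (String × String))) :
    List (String × List (List (String × String))) :=
  let tb := ui_settings.foldl
    (fun (acc : List (List (String × String)) × List (List (String × String))) layer =>
      let layer_id := pvLid layer
      if PySem.Str.startswith layer_id "Top" then (acc.1 ++ [layer], acc.2)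
      else if PySem.Str.startswith layer_id "Bottom" then (acc.1, acc.2 ++ [layer])
      else acc) ([], [])
  [("top", PySem.List.sorted tb.1 (fun x => pvPrio x) false),
   ("bottom", PySem.List.sorted tb.2 (fun x => pvPrio x) false)]

-- the validation loop can only raise ValueError; Pre_ excludes exactly those inputs, so it is a no-op here
def group_layers_for_adaptive_ar_creation (ui_settings : List (List (String × String))) :
    List (String × List (List (String × String))) :=
  let separated := separate_top_bottom_layers ui_settings
  let bottom := ((separated.find? (fun kv => kv.1 == "bottom")).map Prod.snd).getD []
  let top := ((separated.find? (fun kv => kv.1 == "top")).map Prod.snd).getD []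
  [("bottom_primary", bottom.filter (fun l => !(PySem.Str.endswith (pvLid l) "Additional"))),
   ("bottom_additional", bottom.filter (fun l => PySem.Str.endswith (pvLid l) "Additional")),
   ("top_primary", top.filter (fun l => !(PySem.Str.endswith (pvLid l) "Additional"))),
   ("top_additional", top.filter (fun l => PySem.Str.endswith (pvLid l) "Additional"))]

-- ===== PORT B =====
-- single pass: buckets = (bottom_primary, bottom_additional, top_primary, top_additional)
def group_layers_for_adaptive_ar_creation_alt (ui_settings : List (List (String × String))) :
    List (String × List (List (String × String))) :=
  let b := ui_settings.foldl
    (fun (acc : List (List (String × String)) × List (List (String × String)) ×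
                List (List (String × String)) × List (List (String × String))) layer =>
      let layer_id := pvLid layer
      if PySem.Str.startswith layer_id "Top" then
        if PySem.Str.endswith layer_id "Additional" then
          (acc.1, acc.2.1, acc.2.2.1, acc.2.2.2 ++ [layer])
        else (acc.1, acc.2.1, acc.2.2.1 ++ [layer], acc.2.2.2)
      else if PySem.Str.startswith layer_id "Bottom" then
        if PySem.Str.endswith layer_id "Additional" then
          (acc.1, acc.2.1 ++ [layer], acc.2.2.1, acc.2.2.2)
        else (acc.1 ++ [layer], acc.2.1, acc.2.2.1, acc.2.2.2)
      else acc) ([], [], [], [])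
  [("bottom_primary", PySem.List.sorted b.1 (fun x => pvPrio x) false),
   ("bottom_additional", PySem.List.sorted b.2.1 (fun x => pvPrio x) false),
   ("top_primary", PySem.List.sorted b.2.2.1 (fun x => pvPrio x) false),
   ("top_additional", PySem.List.sorted b.2.2.2 (fun x => pvPrio x) false)]

-- ===== PRECONDITION & SPEC =====
def pvIsTop (l : List (String × String)) : Bool := PySem.Str.startswith (pvLid l) "Top"
def pvIsBot (l : List (String × String)) : Bool :=
  !PySem.Str.startswith (pvLid l) "Top" && PySem.Str.startswith (pvLid l) "Bottom"
def pvIsAdd (l : List (String × String)) : Bool := PySem.Str.endswith (pvLid l) "Additional"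

-- Pre_ excludes exactly the inputs on which A raises ValueError: some of the four
-- side/kind groups would contain more than 2 layers (the "Revit limitation" check).
def Pre_group_layers_for_adaptive_ar_creation (ui_settings : List (List (String × String))) : Prop :=
  ui_settings.countP (fun l => pvIsBot l && !pvIsAdd l) ≤ 2 ∧
  ui_settings.countP (fun l => pvIsBot l && pvIsAdd l) ≤ 2 ∧
  ui_settings.countP (fun l => pvIsTop l && !pvIsAdd l) ≤ 2 ∧
  ui_settings.countP (fun l => pvIsTop l && pvIsAdd l) ≤ 2

instance (ui_settings : List (List (String × String))) : Decidable (Pre_group_layers_for_adaptive_ar_creation ui_settings) := by unfold Pre_group_layers_for_adaptive_ar_creation; infer_instance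

def pvWitness_group_layers_for_adaptive_ar_creation : (List (List (String × String))) :=
  [[("layer_id", "Bottom Major")], [("layer_id", "Top Minor Additional")], [("other", "x")]]

def Spec_group_layers_for_adaptive_ar_creation (ui_settings : List (List (String × String))) (out : List (String × List (List (String × String)))) : Prop := out = group_layers_for_adaptive_ar_creation_alt ui_settings
instance (ui_settings : List (List (String × String))) (out : List (String × List (List (String × String)))) : Decidable (Spec_group_layers_for_adaptive_ar_creation ui_settings out) := by unfold Spec_group_layers_for_adaptive_ar_creation; infer_instance

-- ===== CLAIM (what is proved, stated in full; the proofs are below) =====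
def Claim_equal_group_layers_for_adaptive_ar_creation : Prop := ∀ (ui_settings : List (List (String × String))), Dom_group_layers_for_adaptive_ar_creation ui_settings → Pre_group_layers_for_adaptive_ar_creation ui_settings → Spec_group_layers_for_adaptive_ar_creation ui_settings (group_layers_for_adaptive_ar_creation ui_settings)

-- ===== LEMMAS AND PROOFS =====

theorem insertBy_nil {α : Type} (before : α → α → Bool) (x : α) :
    PySem.List.insertBy before x [] = [x] := rfl

theorem insertBy_cons {α : Type} (before : α → α → Bool) (x y : α) (ys : List α) :
    PySem.List.insertBy before x (y :: ys) =
      if before x y then x :: y :: ys else y :: PySem.List.insertBy before x ys := rfl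

theorem pairwise_insertBy {α : Type} (key : α → Int) (x : α) (ys : List α)
    (h : ys.Pairwise (fun a b => key a ≤ key b)) :
    (PySem.List.insertBy (fun a b => decide (key a < key b)) x ys).Pairwise
      (fun a b => key a ≤ key b) := by
  induction ys with
  | nil => simp [insertBy_nil]
  | cons y t ih =>
    rcases List.pairwise_cons.mp h with ⟨hy, ht⟩
    rw [insertBy_cons]
    split_ifs with hlt
    · refine List.pairwise_cons.mpr ⟨?_, h⟩
      intro z hz
      rcases List.mem_cons.mp hz with rfl | hz
      · exact le_of_lt (by simpa using hlt)
      · exact le_trans (le_of_lt (by simpa using hlt)) (hy _ hz)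
    · refine List.pairwise_cons.mpr ⟨?_, ih ht⟩
      intro z hz
      rcases (PySem.List.mem_insertBy _ _ _ _).mp hz with rfl | hz
      · simpa using hlt
      · exact hy _ hz

theorem filter_insertBy {α : Type} (key : α → Int) (p : α → Bool) (x : α) (ys : List α)
    (h : ys.Pairwise (fun a b => key a ≤ key b)) :
    (PySem.List.insertBy (fun a b => decide (key a < key b)) x ys).filter p =
      if p x then PySem.List.insertBy (fun a b => decide (key a < key b)) x (ys.filter p)
      else ys.filter p := by
  induction ys with
  | nil => cases hpx : p x <;> simp [insertBy_nil, hpx]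
  | cons y t ih =>
    rcases List.pairwise_cons.mp h with ⟨hy, ht⟩
    rw [insertBy_cons]
    by_cases hlt : key x < key y
    · simp only [decide_eq_true_eq, hlt, if_pos, decide_true]
      cases hpx : p x
      · simp [List.filter_cons, hpx]
      · cases hpy : p y
        · -- y dropped: x goes in front of filter t since all its keys exceed key x
          have hfront : PySem.List.insertBy (fun a b => decide (key a < key b)) x (t.filter p)
              = x :: t.filter p := by
            cases hft : t.filter p with
            | nil => simp [insertBy_nil]
            | cons z zs =>
              have hz : z ∈ t := by
                have : z ∈ t.filter p := by rw [hft]; exact List.mem_cons_self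
                exact List.mem_of_mem_filter this
              rw [insertBy_cons, if_pos]
              simp only [decide_eq_true_eq]
              exact lt_of_lt_of_le hlt (hy _ hz)
          simp [List.filter_cons, hpx, hpy, hfront]
        · simp [List.filter_cons, hpx, hpy, insertBy_cons, hlt]
    · simp only [decide_eq_true_eq, hlt, if_neg, decide_false, Bool.false_eq_true, not_false_iff]
      cases hpx : p x
      · cases hpy : p y <;> simp_all [List.filter_cons, hpx, hpy]
      · cases hpy : p y
        · simp_all [List.filter_cons, hpx, hpy]
        · simp_all [List.filter_cons, hpx, hpy, insertBy_cons, hlt]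

theorem filter_foldl_insertBy {α : Type} (key : α → Int) (p : α → Bool) :
    ∀ (xs acc : List α), acc.Pairwise (fun a b => key a ≤ key b) →
    (xs.foldl (fun a x => PySem.List.insertBy (fun a b => decide (key a < key b)) x a) acc).filter p
      = (xs.filter p).foldl
          (fun a x => PySem.List.insertBy (fun a b => decide (key a < key b)) x a)
          (acc.filter p) := by
  intro xs
  induction xs with
  | nil => intro acc _; simp
  | cons x t ih =>
    intro acc hacc
    have hstep := ih (PySem.List.insertBy (fun a b => decide (key a < key b)) x acc)
      (pairwise_insertBy key x acc hacc)
    cases hpx : p x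
    · simp only [List.foldl_cons, List.filter_cons, hpx]
      rw [hstep, filter_insertBy key p x acc hacc, hpx]
      simp
    · simp only [List.foldl_cons, List.filter_cons, hpx]
      rw [hstep, filter_insertBy key p x acc hacc, hpx]
      simp

-- stable sort commutes with filtering
theorem filter_sorted {α : Type} (key : α → Int) (p : α → Bool) (xs : List α) :
    (PySem.List.sorted xs key false).filter p = PySem.List.sorted (xs.filter p) key false := by
  rw [PySem.List.sorted_eq_foldl_insertBy, PySem.List.sorted_eq_foldl_insertBy]
  simpa using filter_foldl_insertBy key p xs [] List.Pairwise.nil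

-- A's classification loop appends the Top / (not Top but Bottom) layers in order
theorem foldA_eq (ui : List (List (String × String))) :
    ∀ (t b : List (List (String × String))),
    ui.foldl
      (fun (acc : List (List (String × String)) × List (List (String × String))) layer =>
        let layer_id := pvLid layer
        if PySem.Str.startswith layer_id "Top" then (acc.1 ++ [layer], acc.2)
        else if PySem.Str.startswith layer_id "Bottom" then (acc.1, acc.2 ++ [layer])
        else acc) (t, b)
    = (t ++ ui.filter pvIsTop, b ++ ui.filter pvIsBot) := by
  induction ui with
  | nil => intro t b; simp
  | cons l rest ih =>
    intro t b
    simp at ih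
    by_cases htp : PySem.Str.startswith (pvLid l) "Top" <;>
      by_cases hbt : PySem.Str.startswith (pvLid l) "Bottom" <;>
      simp at htp hbt <;>
      simp [List.filter_cons, pvIsTop, pvIsBot, htp, hbt, ih, List.append_assoc]

-- B's classification loop builds the four filtered buckets in order
theorem foldB_eq (ui : List (List (String × String))) :
    ∀ (bp ba tp ta : List (List (String × String))),
    ui.foldl
      (fun (acc : List (List (String × String)) × List (List (String × String)) ×
                  List (List (String × String)) × List (List (String × String))) layer =>
        let layer_id := pvLid layer
        if PySem.Str.startswith layer_id "Top" then
          if PySem.Str.endswith layer_id "Additional" then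
            (acc.1, acc.2.1, acc.2.2.1, acc.2.2.2 ++ [layer])
          else (acc.1, acc.2.1, acc.2.2.1 ++ [layer], acc.2.2.2)
        else if PySem.Str.startswith layer_id "Bottom" then
          if PySem.Str.endswith layer_id "Additional" then
            (acc.1, acc.2.1 ++ [layer], acc.2.2.1, acc.2.2.2)
          else (acc.1 ++ [layer], acc.2.1, acc.2.2.1, acc.2.2.2)
        else acc) (bp, ba, tp, ta)
    = (bp ++ ui.filter (fun l => !pvIsAdd l && pvIsBot l),
       ba ++ ui.filter (fun l => pvIsAdd l && pvIsBot l),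
       tp ++ ui.filter (fun l => !pvIsAdd l && pvIsTop l),
       ta ++ ui.filter (fun l => pvIsAdd l && pvIsTop l)) := by
  induction ui with
  | nil => intro bp ba tp ta; simp
  | cons l rest ih =>
    intro bp ba tp ta
    simp at ih
    by_cases htp : PySem.Str.startswith (pvLid l) "Top" <;>
      by_cases hbt : PySem.Str.startswith (pvLid l) "Bottom" <;>
      by_cases had : PySem.Str.endswith (pvLid l) "Additional" <;>
      simp at htp hbt had <;>
      simp [List.filter_cons, pvIsTop, pvIsBot, pvIsAdd, htp, hbt, had, ih, List.append_assoc]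

-- ===== VERDICT (by name: the statement is the Claim_ definition above) =====
theorem group_layers_for_adaptive_ar_creation_spec : Claim_equal_group_layers_for_adaptive_ar_creation := by
  intro ui _ _
  unfold Spec_group_layers_for_adaptive_ar_creation
  unfold group_layers_for_adaptive_ar_creation group_layers_for_adaptive_ar_creation_alt
    separate_top_bottom_layers
  rw [foldA_eq, foldB_eq]
  simp [filter_sorted, List.filter_filter, pvIsAdd, pvIsBot, pvIsTop]
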